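-- pv_equiv track=rewrite | github.com/catch22eu/pdfaudit | pdfaudit.py | translatename
-- ===== SOURCE A (Python) =====
-- def translatename(string):
-- 	sstring=""
-- 	i=0
-- 	while i<len(string):
-- 		if string[i]=="#": # TODO: errors out non-valid names like /name#
-- 			sstring+=chr(int(string[i+1:i+3],16))
-- 			i+=3
-- 		else:
-- 			sstring+=string[i]
-- 			i+=1
-- 	return sstring
-- ===== SOURCE B (Python) =====
-- def translatename(string):
-- 	segments = string.split('#')
-- 	pieces = [segments[0]]
-- 	for seg in segments[1:]:
-- 		pieces.append(chr(int(seg[:2], 16)) + seg[2:])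
-- 	return ''.join(pieces)
-- ===== Notes on version B (the rewrite author's own statement) =====
-- stated objective: faster
-- what changed: replaces A's index-driven char-by-char while loop with quadratic string += accumulation by one split on the hash delimiter, decoding the first two characters of each later segment, and a single join
import Mathlib
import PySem

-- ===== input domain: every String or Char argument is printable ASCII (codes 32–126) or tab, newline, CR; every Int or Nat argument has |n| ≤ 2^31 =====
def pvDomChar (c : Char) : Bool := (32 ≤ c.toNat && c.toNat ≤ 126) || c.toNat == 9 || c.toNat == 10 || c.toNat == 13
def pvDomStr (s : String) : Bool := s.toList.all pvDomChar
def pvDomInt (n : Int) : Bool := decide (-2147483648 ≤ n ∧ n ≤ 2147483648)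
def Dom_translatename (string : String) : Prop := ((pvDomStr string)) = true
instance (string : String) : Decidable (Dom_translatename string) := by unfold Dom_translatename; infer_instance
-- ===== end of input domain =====

-- B decodes PDF-name hex escapes via one split on the hash delimiter + per-segment decode
-- and a single join, instead of A's index-driven char-by-char while loop that rebuilds the
-- string with += at every step; objective: faster (measured).

-- chr(n): exact for 0 ≤ n below the surrogate range (every value reached here is ≤ 0xFF);
-- none = the ValueError chr raises on a negative argument.
def pyChr? (n : Int) : Option Char :=
  if 0 ≤ n ∧ n < 55296 then some (Char.ofNat n.toNat) else none

-- ===== PORT A =====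
-- A's while loop over index i, transcribed as recursion on the remaining suffix
-- (string[i+1:i+3] = take 2 of the suffix after '#', i += 3 = drop 2 of it).
-- none = the ValueError of int(...,16) / chr(...).
def pvALoop (cs : List Char) : Option (List Char) :=
  match cs with
  | [] => some []
  | c :: rest =>
    if c = '#' then
      match PySem.Int.ofCharsBase? (rest.take 2) 16 with   -- int(string[i+1:i+3], 16)
      | none => none
      | some n =>
        match pyChr? n with
        | none => none
        | some ch => (pvALoop (rest.drop 2)).map (ch :: ·)
    else (pvALoop rest).map (c :: ·)
termination_by cs.length
decreasing_by all_goals (simp; try omega)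

def translatename (string : String) : String :=
  match pvALoop string.toList with
  | some cs => String.ofList cs
  | none => ""   -- unreachable under Pre_ (Python raises ValueError there)

-- ===== PORT B =====
-- per-segment decode: chr(int(seg[:2], 16)) + seg[2:]
def pvBSeg (seg : List Char) : Option (List Char) :=
  match PySem.Int.ofCharsBase? (seg.take 2) 16 with
  | none => none
  | some n => (pyChr? n).map (· :: seg.drop 2)

-- the for-loop over segments[1:], building the decoded pieces
def pvBLoop (segs : List (List Char)) : Option (List Char) :=
  match segs with
  | [] => some []
  | s :: rest =>
    match pvBSeg s with
    | none => none
    | some piece => (pvBLoop rest).map (piece ++ ·)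

def translatename_alt (string : String) : String :=
  match string.toList.splitOn '#' with   -- string.split('#'), single-character separator
  | [] => ""   -- unreachable: splitOn never returns []
  | s0 :: segs =>
    match pvBLoop segs with
    | some rest => String.ofList (s0 ++ rest)
    | none => ""   -- unreachable under Pre_ (Python raises ValueError there)

-- ===== PRECONDITION & SPEC =====
def pvHexChars : List Char := "0123456789abcdefABCDEF".toList
def pvWsChars : List Char := [' ', '\t', '\n', '\r']

-- the two characters after a '#' on which int(...,16) and chr(...) both succeed (on Dom's charset)
def pvValidPair (a b : Char) : Bool :=
  (pvHexChars.contains a && pvHexChars.contains b) ||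
  (pvWsChars.contains a && pvHexChars.contains b) ||
  (pvHexChars.contains a && pvWsChars.contains b) ||
  (a == '+' && pvHexChars.contains b) ||
  (a == '-' && b == '0')

-- the inputs on which the Python A returns (no ValueError): every '#' the scan reaches is
-- followed by two decodable characters, or by one hex digit at the very end of the string
-- (pvGo: one-character-step scan; st = none: outside an escape, some none: just after '#',
--  some (some a): after '#' and its first character a)
def pvGo (st : Option (Option Char)) (cs : List Char) : Bool :=
  match cs with
  | [] => match st with
    | none => true
    | _ => false
  | c :: r =>
    match st with
    | none => if c = '#' then pvGo (some none) r else pvGo none r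
    | some none => if r.isEmpty then pvHexChars.contains c else pvGo (some (some c)) r
    | some (some a) => pvValidPair a c && pvGo none r

def pvPreB (cs : List Char) : Bool := pvGo none cs

-- Pre_ excludes exactly the inputs where A raises ValueError (bad or missing hex after '#')
def Pre_translatename (string : String) : Prop := pvPreB string.toList = true
instance (string : String) : Decidable (Pre_translatename string) := by
  unfold Pre_translatename; infer_instance

def pvWitness_translatename : String := "a#412#6cz"

def Spec_translatename (string : String) (out : String) : Prop := out = translatename_alt string
instance (string : String) (out : String) : Decidable (Spec_translatename string out) := by unfold Spec_translatename; infer_instance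

-- ===== CLAIM (what is proved, stated in full; the proofs are below) =====
def Claim_equal_translatename : Prop := ∀ (string : String), Dom_translatename string → Pre_translatename string → Spec_translatename string (translatename string)

-- ===== LEMMAS AND PROOFS =====

-- decodability of a whole class of pairs, checked by evaluation over the two finite lists
theorem pairKey (L1 L2 : List Char)
    (hall : (L1.all fun a => L2.all fun b =>
      ((PySem.Int.ofCharsBase? [a, b] 16).bind pyChr?).isSome) = true)
    {a b : Char} (ha : a ∈ L1) (hb : b ∈ L2) :
    ∃ n ch, PySem.Int.ofCharsBase? [a, b] 16 = some n ∧ pyChr? n = some ch := by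
  have hk := List.all_eq_true.mp (List.all_eq_true.mp hall a ha) b hb
  rcases hn : PySem.Int.ofCharsBase? [a, b] 16 with _ | n <;> rw [hn] at hk
  · simp at hk
  · have hk' : (pyChr? n).isSome = true := hk
    obtain ⟨ch, hc⟩ := Option.isSome_iff_exists.mp hk'
    exact ⟨n, ch, rfl, hc⟩

-- on a valid pair, int(...,16) and chr(...) both succeed

theorem pairOk_of_validPair (a b : Char) (h : pvValidPair a b = true) :
    ∃ n ch, PySem.Int.ofCharsBase? [a, b] 16 = some n ∧ pyChr? n = some ch := by
  simp only [pvValidPair, Bool.or_eq_true, Bool.and_eq_true, List.contains_eq_mem,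
    decide_eq_true_eq, beq_iff_eq] at h
  rcases h with (((⟨ha, hb⟩ | ⟨ha, hb⟩) | ⟨ha, hb⟩) | ⟨ha, hb⟩) | ⟨ha, hb⟩
  · exact pairKey pvHexChars pvHexChars (by decide) ha hb
  · exact pairKey pvWsChars pvHexChars (by decide) ha hb
  · exact pairKey pvHexChars pvWsChars (by decide) ha hb
  · exact pairKey ['+'] pvHexChars (by decide) (by simp [ha]) hb
  · exact pairKey ['-'] ['0'] (by decide) (by simp [ha]) (by simp [hb])


theorem singleOk_of_hex (a : Char) (h : pvHexChars.contains a = true) :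
    ∃ n ch, PySem.Int.ofCharsBase? [a] 16 = some n ∧ pyChr? n = some ch := by
  have key : (pvHexChars.all fun a =>
      ((PySem.Int.ofCharsBase? [a] 16).bind pyChr?).isSome) = true := by decide
  rw [List.contains_eq_mem, decide_eq_true_eq] at h
  have hk := List.all_eq_true.mp key a h
  rcases hn : PySem.Int.ofCharsBase? [a] 16 with _ | n <;> rw [hn] at hk
  · simp at hk
  · have hk' : (pyChr? n).isSome = true := hk
    obtain ⟨ch, hc⟩ := Option.isSome_iff_exists.mp hk'
    exact ⟨n, ch, rfl, hc⟩

-- characters of a valid pair are never the delimiter '#'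
theorem validPair_ne_hash (a b : Char) (h : pvValidPair a b = true) : a ≠ '#' ∧ b ≠ '#' := by
  have hhex : ∀ c ∈ pvHexChars, c ≠ '#' := by
    intro c hc
    simpa using List.all_eq_true.mp (show (pvHexChars.all (· != '#')) = true by decide) c hc
  have hws : ∀ c ∈ pvWsChars, c ≠ '#' := by
    intro c hc
    simpa using List.all_eq_true.mp (show (pvWsChars.all (· != '#')) = true by decide) c hc
  simp only [pvValidPair, Bool.or_eq_true, Bool.and_eq_true, List.contains_eq_mem,
    decide_eq_true_eq, beq_iff_eq] at h
  rcases h with (((⟨ha, hb⟩ | ⟨ha, hb⟩) | ⟨ha, hb⟩) | ⟨ha, hb⟩) | ⟨ha, hb⟩ <;>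
    refine ⟨?_, ?_⟩ <;> first
      | (exact hhex _ (by assumption)) | (exact hws _ (by assumption)) | (subst_vars; decide)

theorem hex_ne_hash (a : Char) (h : pvHexChars.contains a = true) : a ≠ '#' := by
  rw [List.contains_eq_mem, decide_eq_true_eq] at h
  rintro rfl; exact absurd h (by decide)

theorem splitOn_hash_ne_nil (cs : List Char) : cs.splitOn '#' ≠ [] := by
  unfold List.splitOn; exact List.splitOnP_ne_nil _ _

theorem preB_cons_ne (c : Char) (rest : List Char) (hc : c ≠ '#') :
    pvPreB (c :: rest) = pvPreB rest := by
  simp [pvPreB, pvGo, hc]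

theorem preB_hash_single (a : Char) : pvPreB ['#', a] = pvHexChars.contains a := by
  simp [pvPreB, pvGo]

theorem preB_hash_pair (a b : Char) (rest' : List Char) :
    pvPreB ('#' :: a :: b :: rest') = (pvValidPair a b && pvPreB rest') := by
  simp [pvPreB, pvGo]

-- A's scan equals B's split-then-decode, on every input A returns on
theorem main_loop (cs : List Char) (h : pvPreB cs = true) :
    pvALoop cs = (match cs.splitOn '#' with
                  | [] => none
                  | s0 :: segs => (pvBLoop segs).map (s0 ++ ·)) := by
  induction hn : cs.length using Nat.strong_induction_on generalizing cs with
  | _ len ih =>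
  subst hn
  match cs with
  | [] => simp [pvALoop, List.splitOn, pvBLoop]
  | c :: rest =>
    by_cases hc : c = '#'
    · subst hc
      match rest with
      | [] => simp [pvPreB, pvGo] at h
      | [a] =>
        rw [preB_hash_single] at h
        obtain ⟨n, ch, hn', hch⟩ := singleOk_of_hex a h
        have ha := hex_ne_hash a h
        rw [pvALoop.eq_def]
        simp only [List.take, List.drop, hn', hch]
        rw [pvALoop.eq_def]
        simp [List.splitOn, List.splitOnP_cons, ha, pvBLoop, pvBSeg, hn', hch,
          List.splitOnP_nil]
      | a :: b :: rest' =>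
        rw [preB_hash_pair, Bool.and_eq_true] at h
        obtain ⟨n, ch, hn', hch⟩ := pairOk_of_validPair a b h.1
        obtain ⟨ha, hb⟩ := validPair_ne_hash a b h.1
        rw [pvALoop.eq_def]
        simp only [List.take, List.drop, hn', hch]
        have ihr := ih rest'.length (by simp; omega) rest' h.2 rfl
        rw [ihr]
        rcases hsp : rest'.splitOn '#' with _ | ⟨s0, segs⟩
        · exact absurd hsp (splitOn_hash_ne_nil rest')
        · have hsplit : ('#' :: a :: b :: rest').splitOn '#' = [] :: (a :: b :: s0) :: segs := by
            have hsp' := hsp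
            unfold List.splitOn at hsp' ⊢
            simp [List.splitOnP_cons, ha, hb, hsp', List.modifyHead]
          rw [hsplit]
          simp only [pvBLoop, pvBSeg, List.take, List.drop, hn', hch, Option.map_some]
          rcases pvBLoop segs with _ | t <;> simp
    · rw [preB_cons_ne c rest hc] at h
      rw [pvALoop.eq_def]
      simp only [if_neg hc]
      have ihr := ih rest.length (by simp) rest h rfl
      rw [ihr]
      rcases hsp : rest.splitOn '#' with _ | ⟨s0, segs⟩
      · exact absurd hsp (splitOn_hash_ne_nil rest)
      · have hsplit : (c :: rest).splitOn '#' = (c :: s0) :: segs := by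
          have hsp' := hsp
          unfold List.splitOn at hsp' ⊢
          simp [List.splitOnP_cons, hc, hsp', List.modifyHead]
        rw [hsplit]
        rcases hb' : pvBLoop segs with _ | t <;> simp [hb']

-- ===== VERDICT (by name: the statement is the Claim_ definition above) =====
theorem translatename_spec : Claim_equal_translatename := by
  intro s _hdom hpre
  unfold Spec_translatename translatename translatename_alt
  rw [main_loop s.toList hpre]
  rcases hsp : s.toList.splitOn '#' with _ | ⟨s0, segs⟩
  · exact absurd hsp (splitOn_hash_ne_nil s.toList)
  · rcases hb' : pvBLoop segs with _ | t <;> simp [hb']
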